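-- pv_equiv track=rewrite | github.com/gavinsolus/CMEM | scripts/cmem.py | generate_lipid_list
-- ===== SOURCE A (Python) =====
-- def generate_lipid_list(lipid_dict, length, lipid2atom):
--
--
--     lipid_list = []
--     lipid_name = []
--     lipid_counts = lipid_dict.copy()
--
--
--     lipid_order = list(lipid_counts.keys())
--
--     while len(lipid_list) < length:
--
--         for lipid in lipid_order:
--             if lipid_counts[lipid] > 0:
--                 lipid_list.append(lipid2atom[lipid])
--                 lipid_counts[lipid] -= 1
--                 lipid_name.append(lipid)
--
--
--         lipid_order = [lipid for lipid in lipid_order if lipid_counts[lipid] > 0]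
--
--
--         if not lipid_order:
--             lipid_counts = lipid_dict.copy()
--             lipid_order = list(lipid_counts.keys())
--     lipid_list.insert(0, lipid_list[0])
--
--     return lipid_list[:length]
-- ===== SOURCE B (Python) =====
-- def generate_lipid_list(lipid_dict, length, lipid2atom):
--     # Compute the single repeating refill-cycle once, then grow by whole blocks.
--     order = list(lipid_dict.keys())
--     max_c = max(lipid_dict.values(), default=0)
--     base = [lipid2atom[l] for i in range(max_c) for l in order if lipid_dict[l] > i]
--     lipid_list = []
--     while len(lipid_list) < length:
--         lipid_list.extend(base)
--     lipid_list.insert(0, lipid_list[0])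
--     return lipid_list[:length]
-- ===== Notes on version B (the rewrite author's own statement) =====
-- stated objective: simpler
-- what changed: B computes the single repeating refill-cycle once as a closed-form comprehension and grows the list by whole-block extends, replacing A's per-pass filter/decrement/refill state machine.
import Mathlib
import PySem

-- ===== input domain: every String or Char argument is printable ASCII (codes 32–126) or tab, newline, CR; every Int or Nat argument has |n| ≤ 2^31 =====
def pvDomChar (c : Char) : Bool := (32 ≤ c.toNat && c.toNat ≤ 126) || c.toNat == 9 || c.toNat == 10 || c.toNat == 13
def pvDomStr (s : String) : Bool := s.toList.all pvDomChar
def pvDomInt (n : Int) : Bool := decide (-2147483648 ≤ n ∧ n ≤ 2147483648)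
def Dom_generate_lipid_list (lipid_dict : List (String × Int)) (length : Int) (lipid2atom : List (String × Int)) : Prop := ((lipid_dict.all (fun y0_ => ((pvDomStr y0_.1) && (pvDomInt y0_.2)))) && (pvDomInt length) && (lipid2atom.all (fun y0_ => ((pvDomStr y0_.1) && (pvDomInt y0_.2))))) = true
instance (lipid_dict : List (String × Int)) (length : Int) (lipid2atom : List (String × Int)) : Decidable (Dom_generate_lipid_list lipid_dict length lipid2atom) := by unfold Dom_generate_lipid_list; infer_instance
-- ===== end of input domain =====

-- B computes the repeating refill-cycle once and grows the list by whole blocks; A rebuilds it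
-- pass by pass with a mutable counts dict. Equal return values proved on Pre_ (where A returns).

-- ===== PORT A =====
-- one pass: `for lipid in lipid_order: if counts[lipid] > 0: append lipid2atom[lipid]; counts[lipid] -= 1`
def pvPassA (l2a : PySem.Dict String Int) (order : List String)
    (st : List Int × PySem.Dict String Int) : List Int × PySem.Dict String Int :=
  order.foldl (fun s l =>
    if s.2.getD l 0 > 0 then (s.1 ++ [(l2a.get? l).getD 0], s.2.insert l (s.2.getD l 0 - 1))
    else s) st

-- the while loop, with fuel (the loop itself has no bound; on Pre_ inputs every iteration
-- appends at least one atom, so `length.toNat + 1` guard checks suffice)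
def pvLoopA (d0 l2a : PySem.Dict String Int) (length : Int) :
    Nat → List Int → PySem.Dict String Int → List String → List Int
  | 0, acc, _, _ => acc
  | fuel+1, acc, counts, order =>
    if (acc.length : Int) < length then
      let st := pvPassA l2a order (acc, counts)
      let order' := order.filter (fun l => st.2.getD l 0 > 0)
      if order'.isEmpty then pvLoopA d0 l2a length fuel st.1 d0 d0.keys
      else pvLoopA d0 l2a length fuel st.1 st.2 order'
    else acc

def generate_lipid_list (lipid_dict : List (String × Int)) (length : Int) (lipid2atom : List (String × Int)) : List Int :=
  let d0 := PySem.Dict.ofList lipid_dict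
  let l2a := PySem.Dict.ofList lipid2atom
  let lst := pvLoopA d0 l2a length (length.toNat + 1) [] d0 d0.keys
  match PySem.List.pyGet? lst 0 with
  | none => []   -- lipid_list[0] raises IndexError in Python: outside Pre_
  | some h => PySem.List.slice (h :: lst) none (some length)

-- ===== PORT B =====
def pvGrowB (base : List Int) (length : Int) : Nat → List Int → List Int
  | 0, acc => acc
  | fuel+1, acc => if (acc.length : Int) < length then pvGrowB base length fuel (acc ++ base) else acc

def generate_lipid_list_alt (lipid_dict : List (String × Int)) (length : Int) (lipid2atom : List (String × Int)) : List Int :=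
  let d := PySem.Dict.ofList lipid_dict
  let l2a := PySem.Dict.ofList lipid2atom
  let order := d.keys
  let max_c := PySem.List.maxD d.values (fun v => v) 0
  let base := (PySem.List.pyRange 0 max_c).flatMap (fun i =>
     (order.filter (fun l => d.getD l 0 > i)).map (fun l => (l2a.get? l).getD 0))
  let lst := pvGrowB base length (length.toNat + 1) []
  match PySem.List.pyGet? lst 0 with
  | none => []   -- lipid_list[0] raises IndexError in Python: outside Pre_
  | some h => PySem.List.slice (h :: lst) none (some length)

-- ===== PRECONDITION & SPEC =====
-- Pre_ is exactly where the Python A returns: length ≥ 1 (else lipid_list[0] raises IndexError),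
-- some lipid has a positive count (else the while loop never terminates), and every lipid with a
-- positive count is a key of lipid2atom (else lipid2atom[lipid] raises KeyError).
def Pre_generate_lipid_list (lipid_dict : List (String × Int)) (length : Int) (lipid2atom : List (String × Int)) : Prop :=
  1 ≤ length ∧
  (∃ p ∈ (PySem.Dict.ofList lipid_dict).items, 0 < p.2) ∧
  (∀ p ∈ (PySem.Dict.ofList lipid_dict).items, 0 < p.2 → (PySem.Dict.ofList lipid2atom).contains p.1 = true)
instance (lipid_dict : List (String × Int)) (length : Int) (lipid2atom : List (String × Int)) : Decidable (Pre_generate_lipid_list lipid_dict length lipid2atom) := by unfold Pre_generate_lipid_list; infer_instance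

def pvWitness_generate_lipid_list : (List (String × Int)) × Int × (List (String × Int)) :=
  ([("POPC", 2), ("DOPE", 1)], 5, [("POPC", 134), ("DOPE", 125)])

def Spec_generate_lipid_list (lipid_dict : List (String × Int)) (length : Int) (lipid2atom : List (String × Int)) (out : List Int) : Prop := out = generate_lipid_list_alt lipid_dict length lipid2atom
instance (lipid_dict : List (String × Int)) (length : Int) (lipid2atom : List (String × Int)) (out : List Int) : Decidable (Spec_generate_lipid_list lipid_dict length lipid2atom out) := by unfold Spec_generate_lipid_list; infer_instance

-- ===== CLAIM (what is proved, stated in full; the proofs are below) =====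
def Claim_equal_generate_lipid_list : Prop := ∀ (lipid_dict : List (String × Int)) (length : Int) (lipid2atom : List (String × Int)), Dom_generate_lipid_list lipid_dict length lipid2atom → Pre_generate_lipid_list lipid_dict length lipid2atom → Spec_generate_lipid_list lipid_dict length lipid2atom (generate_lipid_list lipid_dict length lipid2atom)

-- ===== LEMMAS AND PROOFS =====

-- abbreviations for the proof (d0 = dict(lipid_dict), l2a = dict(lipid2atom))
def pvAtom (l2a : PySem.Dict String Int) (l : String) : Int := (l2a.get? l).getD 0

-- the atoms appended by pass number i of an epoch
def pvPass (d0 l2a : PySem.Dict String Int) (i : Int) : List Int :=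
  (d0.keys.filter (fun l => d0.getD l 0 > i)).map (pvAtom l2a)

-- first i passes of an epoch
def pvPartial (d0 l2a : PySem.Dict String Int) (i : Nat) : List Int :=
  (List.range i).flatMap (fun (j : Nat) => pvPass d0 l2a (j : Int))

-- k full epochs
def pvRep (base : List Int) (k : Nat) : List Int := (List.replicate k base).flatten

theorem pvRep_succ (base : List Int) (k : Nat) :
    pvRep base (k + 1) = pvRep base k ++ base := by
  induction k with
  | zero => simp [pvRep]
  | succ k ih =>
    simp only [pvRep, List.replicate_succ, List.flatten_cons] at ih ⊢
    rw [List.append_assoc, ← ih, ← List.append_assoc]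

theorem pvRep_prefix (base : List Int) {m M : Nat} (h : m ≤ M) :
    pvRep base m <+: pvRep base M := by
  obtain ⟨d, rfl⟩ := Nat.exists_eq_add_of_le h
  refine ⟨(List.replicate d base).flatten, ?_⟩
  simp only [pvRep, List.replicate_add, List.flatten_append]

theorem pvPartial_succ (d0 l2a : PySem.Dict String Int) (i : Nat) :
    pvPartial d0 l2a (i + 1) = pvPartial d0 l2a i ++ pvPass d0 l2a (i : Int) := by
  simp [pvPartial, List.range_succ]

theorem pvPassA_spec (l2a : PySem.Dict String Int) :
    ∀ (order : List String) (acc : List Int) (counts : PySem.Dict String Int), order.Nodup →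
    (pvPassA l2a order (acc, counts)).1
        = acc ++ (order.filter (fun l => counts.getD l 0 > 0)).map (pvAtom l2a) ∧
    (∀ l : String, (pvPassA l2a order (acc, counts)).2.getD l 0
        = if l ∈ order ∧ counts.getD l 0 > 0 then counts.getD l 0 - 1 else counts.getD l 0) := by
  intro order
  induction order with
  | nil => intro acc counts _; simp [pvPassA]
  | cons h t ih =>
    intro acc counts hnd
    have hht : h ∉ t := (List.nodup_cons.mp hnd).1
    have hndt : t.Nodup := (List.nodup_cons.mp hnd).2
    by_cases hc : counts.getD h 0 > 0
    · have step : pvPassA l2a (h :: t) (acc, counts)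
          = pvPassA l2a t (acc ++ [pvAtom l2a h], counts.insert h (counts.getD h 0 - 1)) := by
        simp [pvPassA, hc, pvAtom]
      obtain ⟨ih1, ih2⟩ := ih (acc ++ [pvAtom l2a h]) (counts.insert h (counts.getD h 0 - 1)) hndt
      constructor
      · rw [step, ih1]
        have hf : t.filter (fun l => (counts.insert h (counts.getD h 0 - 1)).getD l 0 > 0)
            = t.filter (fun l => counts.getD l 0 > 0) := by
          apply List.filter_congr
          intro l hl
          have : l ≠ h := fun e => hht (e ▸ hl)
          rw [PySem.Dict.getD_insert_of_ne _ _ _ this]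
        rw [hf]
        simp [hc]
      · intro l
        rw [step, ih2 l]
        by_cases hlh : l = h
        · subst hlh
          simp [hht, PySem.Dict.getD_insert_self, hc]
        · rw [PySem.Dict.getD_insert_of_ne _ _ _ hlh]
          simp [hlh]
    · have step : pvPassA l2a (h :: t) (acc, counts) = pvPassA l2a t (acc, counts) := by
        simp [pvPassA, hc]
      obtain ⟨ih1, ih2⟩ := ih acc counts hndt
      constructor
      · rw [step, ih1]; simp [hc]
      · intro l
        rw [step, ih2 l]
        by_cases hlh : l = h
        · subst hlh; simp [hc]
        · simp [hlh]

-- B's loop: the result is whole blocks and long enough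
theorem pvGrowB_spec (base : List Int) (length : Int) (hbase : base ≠ []) :
    ∀ (fuel : Nat) (acc : List Int) (k : Nat), acc = pvRep base k →
    (length ≤ (acc.length : Int) + fuel) →
    ∃ m, pvGrowB base length fuel acc = pvRep base m ∧
      length ≤ ((pvGrowB base length fuel acc).length : Int) := by
  intro fuel
  induction fuel with
  | zero =>
    intro acc k hk hlen
    exact ⟨k, by simpa using hk, by simpa using hlen⟩
  | succ fuel ih =>
    intro acc k hk hlen
    by_cases hg : (acc.length : Int) < length
    · have h1 : 1 ≤ base.length := List.length_pos_iff.mpr hbase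
      have := ih (acc ++ base) (k + 1) (by rw [hk, pvRep_succ])
        (by simp only [List.length_append]; push_cast; omega)
      simpa [pvGrowB, hg] using this
    · exact ⟨k, by simp [pvGrowB, hg]; exact hk, by simp [pvGrowB, hg]; omega⟩

-- max-count abbreviations
def pvMaxC (d0 : PySem.Dict String Int) : Int := PySem.List.maxD d0.values (fun v => v) 0
def pvM (d0 : PySem.Dict String Int) : Nat := (pvMaxC d0).toNat
def pvBase (d0 l2a : PySem.Dict String Int) : List Int := pvPartial d0 l2a (pvM d0)

theorem pvGetD_le_maxC (d0 : PySem.Dict String Int) (hnd : d0.keys.Nodup)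
    {l : String} (hl : l ∈ d0.keys) : d0.getD l 0 ≤ pvMaxC d0 := by
  have hv : d0.getD l 0 ∈ d0.values := by
    rw [PySem.Dict.values_eq_map_keys d0 hnd 0]
    exact List.mem_map_of_mem hl
  exact PySem.List.le_maxD_id d0.values 0 _ hv

theorem pvPass_nil (d0 l2a : PySem.Dict String Int) (hnd : d0.keys.Nodup)
    {i : Int} (h : pvMaxC d0 ≤ i) : pvPass d0 l2a i = [] := by
  unfold pvPass
  rw [List.filter_eq_nil_iff.mpr]
  · rfl
  · intro l hl
    have := pvGetD_le_maxC d0 hnd hl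
    simp only [decide_eq_true_eq]
    omega

theorem pvPartial_ge (d0 l2a : PySem.Dict String Int) (hnd : d0.keys.Nodup)
    {i : Nat} (h : pvM d0 ≤ i) : pvPartial d0 l2a i = pvBase d0 l2a := by
  induction i, h using Nat.le_induction with
  | base => rfl
  | succ i hMi ih =>
    rw [pvPartial_succ, ih, pvPass_nil d0 l2a hnd, List.append_nil]
    have h1 : pvMaxC d0 ≤ (pvM d0 : Int) := Int.self_le_toNat _
    have h2 : (pvM d0 : Int) ≤ (i : Int) := by exact_mod_cast hMi
    omega

theorem pvPartial_prefix (d0 l2a : PySem.Dict String Int) {i j : Nat} (h : i ≤ j) :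
    pvPartial d0 l2a i <+: pvPartial d0 l2a j := by
  induction j, h using Nat.le_induction with
  | base => exact List.prefix_refl _
  | succ j hij ih =>
    rw [pvPartial_succ]
    exact ih.trans (List.prefix_append _ _)

theorem pvPass0_ne (d0 l2a : PySem.Dict String Int) (hnd : d0.keys.Nodup)
    (hpos : ∃ p ∈ d0.items, 0 < p.2) : pvPass d0 l2a 0 ≠ [] := by
  obtain ⟨⟨l, v⟩, hm, hv⟩ := hpos
  have hk : l ∈ d0.keys := PySem.Dict.mem_keys_of_mem_items d0 hm
  have hg : d0.getD l 0 = v := PySem.Dict.getD_of_mem_items d0 hm hnd 0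
  have : l ∈ d0.keys.filter (fun l => d0.getD l 0 > (0 : Int)) := by
    rw [List.mem_filter]
    exact ⟨hk, by simp only [decide_eq_true_eq]; omega⟩
  exact List.ne_nil_of_mem (List.mem_map_of_mem (f := pvAtom l2a) this)

theorem pvM_pos (d0 : PySem.Dict String Int) (hnd : d0.keys.Nodup)
    (hpos : ∃ p ∈ d0.items, 0 < p.2) : 1 ≤ pvM d0 := by
  obtain ⟨⟨l, v⟩, hm, hv⟩ := hpos
  have hk : l ∈ d0.keys := PySem.Dict.mem_keys_of_mem_items d0 hm
  have hg : d0.getD l 0 = v := PySem.Dict.getD_of_mem_items d0 hm hnd 0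
  have := pvGetD_le_maxC d0 hnd hk
  unfold pvM
  omega

theorem pvBase_ne (d0 l2a : PySem.Dict String Int) (hnd : d0.keys.Nodup)
    (hpos : ∃ p ∈ d0.items, 0 < p.2) : pvBase d0 l2a ≠ [] := by
  intro hnil
  have h1 : pvPartial d0 l2a 1 <+: pvBase d0 l2a :=
    pvPartial_prefix d0 l2a (pvM_pos d0 hnd hpos)
  rw [hnil, List.prefix_nil] at h1
  have : pvPartial d0 l2a 1 = pvPass d0 l2a 0 := by
    rw [pvPartial_succ]; simp [pvPartial]
  exact pvPass0_ne d0 l2a hnd hpos (by rw [← this, h1])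

-- A's loop: the result is a prefix of whole blocks and long enough
theorem pvLoopA_spec (d0 l2a : PySem.Dict String Int) (length : Int)
    (hnd : d0.keys.Nodup) (hpos : ∃ p ∈ d0.items, 0 < p.2) :
    ∀ (fuel : Nat) (acc : List Int) (counts : PySem.Dict String Int) (order : List String)
      (k i : Nat), i < pvM d0 →
    acc = pvRep (pvBase d0 l2a) k ++ pvPartial d0 l2a i →
    ((i = 0 ∧ counts = d0 ∧ order = d0.keys) ∨
     (1 ≤ i ∧ order = d0.keys.filter (fun l => d0.getD l 0 > (i : Int)) ∧ order ≠ [] ∧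
       ∀ l ∈ order, counts.getD l 0 = d0.getD l 0 - i)) →
    length ≤ (acc.length : Int) + fuel →
    ∃ m, pvLoopA d0 l2a length fuel acc counts order <+: pvRep (pvBase d0 l2a) m ∧
      length ≤ ((pvLoopA d0 l2a length fuel acc counts order).length : Int) := by
  intro fuel
  induction fuel with
  | zero =>
    intro acc counts order k i hiM hacc hinv hlen
    refine ⟨k + 1, ?_, by simpa using hlen⟩
    show acc <+: _
    rw [hacc, pvRep_succ]
    exact (List.prefix_append_right_inj _).mpr
      ((pvPartial_prefix d0 l2a hiM.le).trans (by rw [pvPartial_ge d0 l2a hnd le_rfl]))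
  | succ fuel ih =>
    intro acc counts order k i hiM hacc hinv hlen
    by_cases hg : (acc.length : Int) < length
    · have hred : pvLoopA d0 l2a length (fuel+1) acc counts order =
        (if (order.filter (fun l => (pvPassA l2a order (acc, counts)).2.getD l 0 > 0)).isEmpty
         then pvLoopA d0 l2a length fuel (pvPassA l2a order (acc, counts)).1 d0 d0.keys
         else pvLoopA d0 l2a length fuel (pvPassA l2a order (acc, counts)).1
            (pvPassA l2a order (acc, counts)).2
            (order.filter (fun l => (pvPassA l2a order (acc, counts)).2.getD l 0 > 0))) := by
        simp only [pvLoopA, if_pos hg]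
      have hord_nd : order.Nodup := by
        rcases hinv with ⟨_, _, rfl⟩ | ⟨_, rfl, _, _⟩
        · exact hnd
        · exact hnd.filter _
      obtain ⟨hst1, hst2⟩ := pvPassA_spec l2a order acc counts hord_nd
      -- the pass appends exactly pvPass i
      have hpassList : (order.filter (fun l => counts.getD l 0 > 0)).map (pvAtom l2a)
          = pvPass d0 l2a (i : Int) := by
        rcases hinv with ⟨hi0, rfl, rfl⟩ | ⟨hi1, hord, _, hcnt⟩
        · subst hi0; rfl
        · have : order.filter (fun l => counts.getD l 0 > 0) = order := by
            apply List.filter_eq_self.mpr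
            intro l hl
            have hc := hcnt l hl
            have : d0.getD l 0 > (i : Int) := by
              rw [hord] at hl
              simpa using (List.mem_filter.mp hl).2
            simp only [decide_eq_true_eq]
            omega
          rw [this, hord]
          rfl
      have hpass_ne : pvPass d0 l2a (i : Int) ≠ [] := by
        rcases hinv with ⟨hi0, _, _⟩ | ⟨hi1, hord, hord_ne, _⟩
        · subst hi0; exact pvPass0_ne d0 l2a hnd hpos
        · unfold pvPass
          rw [← hord]
          simpa [List.map_eq_nil_iff] using hord_ne
      have hacc' : (pvPassA l2a order (acc, counts)).1
          = pvRep (pvBase d0 l2a) k ++ pvPartial d0 l2a (i + 1) := by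
        rw [hst1, hpassList, hacc, pvPartial_succ, List.append_assoc]
      have hlen' : length ≤ (((pvPassA l2a order (acc, counts)).1).length : Int) + fuel := by
        have h1 : 1 ≤ (pvPass d0 l2a (i : Int)).length := List.length_pos_iff.mpr hpass_ne
        rw [hst1, hpassList]
        simp only [List.length_append]
        push_cast at hlen ⊢
        omega
      -- the filtered order after the pass
      have horder' : order.filter (fun l => (pvPassA l2a order (acc, counts)).2.getD l 0 > 0)
          = d0.keys.filter (fun l => d0.getD l 0 > ((i : Int) + 1)) := by
        rcases hinv with ⟨hi0, hcnts, hord⟩ | ⟨hi1, hord, _, hcnt⟩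
        · subst hi0; subst hcnts; subst hord
          apply List.filter_congr
          intro l hl
          rw [hst2 l]
          simp only [decide_eq_decide, hl, true_and]
          by_cases h : counts.getD l 0 > 0 <;> simp [h] <;> omega
        · have step1 : order.filter (fun l => (pvPassA l2a order (acc, counts)).2.getD l 0 > 0)
              = order.filter (fun l => d0.getD l 0 > ((i : Int) + 1)) := by
            apply List.filter_congr
            intro l hl
            have hc := hcnt l hl
            have hdl : d0.getD l 0 > (i : Int) := by
              rw [hord] at hl
              simpa using (List.mem_filter.mp hl).2
            rw [hst2 l]
            simp only [hl, true_and, decide_eq_decide]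
            by_cases h : counts.getD l 0 > 0 <;> simp [h] <;> omega
          rw [step1, hord, List.filter_filter]
          apply List.filter_congr
          intro l _
          by_cases h1 : d0.getD l 0 > ((i : Int) + 1) <;>
            by_cases h2 : d0.getD l 0 > (i : Int) <;> simp [h1, h2] <;> omega
      rw [hred]
      by_cases hemp : (order.filter (fun l => (pvPassA l2a order (acc, counts)).2.getD l 0 > 0)).isEmpty
      · -- refill: this pass finished the epoch, i + 1 = pvM d0
        have hnil : d0.keys.filter (fun l => d0.getD l 0 > ((i : Int) + 1)) = [] := by
          rw [← horder']
          exact List.isEmpty_iff.mp hemp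
        have hMle : pvM d0 ≤ i + 1 := by
          obtain ⟨⟨l, v⟩, hm, hv⟩ := hpos
          have hk : l ∈ d0.keys := PySem.Dict.mem_keys_of_mem_items d0 hm
          have hvne : d0.values ≠ [] := by
            rw [PySem.Dict.values_eq_map_keys d0 hnd 0]
            simpa [List.map_eq_nil_iff] using List.ne_nil_of_mem hk
          have hmem : pvMaxC d0 ∈ d0.values := PySem.List.maxD_mem d0.values _ 0 hvne
          rw [PySem.Dict.values_eq_map_keys d0 hnd 0] at hmem
          obtain ⟨l', hl', hgl'⟩ := List.mem_map.mp hmem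
          have : ¬ (d0.getD l' 0 > ((i : Int) + 1)) := by
            intro hgt
            have : l' ∈ d0.keys.filter (fun l => d0.getD l 0 > ((i : Int) + 1)) :=
              List.mem_filter.mpr ⟨hl', by simpa using hgt⟩
            rw [hnil] at this
            exact absurd this (List.not_mem_nil)
          unfold pvM
          omega
        have hMeq : pvM d0 = i + 1 := le_antisymm hMle hiM
        have hacc'' : (pvPassA l2a order (acc, counts)).1 = pvRep (pvBase d0 l2a) (k + 1) := by
          rw [hacc', ← hMeq, pvPartial_ge d0 l2a hnd le_rfl, ← pvRep_succ]
        rw [if_pos hemp]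
        exact ih _ d0 d0.keys (k + 1) 0 (by omega)
          (by rw [hacc'']; simp [pvPartial]) (Or.inl ⟨rfl, rfl, rfl⟩) hlen'
      · -- continue the epoch with pass i + 1
        have hord_ne : d0.keys.filter (fun l => d0.getD l 0 > ((i : Int) + 1)) ≠ [] := by
          rw [← horder']
          simpa [List.isEmpty_iff] using hemp
        have hi1M : i + 1 < pvM d0 := by
          obtain ⟨l, hl⟩ := List.exists_mem_of_ne_nil _ hord_ne
          have hk := (List.mem_filter.mp hl).1
          have hgt : d0.getD l 0 > ((i : Int) + 1) := by
            simpa using (List.mem_filter.mp hl).2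
          have := pvGetD_le_maxC d0 hnd hk
          unfold pvM
          omega
        rw [if_neg hemp]
        refine ih _ _ _ k (i + 1) hi1M hacc' (Or.inr ⟨by omega, ?_, ?_, ?_⟩) hlen'
        · rw [horder']; push_cast; rfl
        · rw [horder']; exact hord_ne
        · intro l hl
          rw [horder'] at hl
          have hgt : d0.getD l 0 > ((i : Int) + 1) := by
            simpa using (List.mem_filter.mp hl).2
          have hk := (List.mem_filter.mp hl).1
          rcases hinv with ⟨hi0, hcnts, hord⟩ | ⟨hi1, hord, _, hcnt⟩
          · subst hi0; subst hcnts; subst hord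
            rw [hst2 l]
            simp only [hk, true_and]
            rw [if_pos (by omega)]
            push_cast
            omega
          · have hlo : l ∈ order := by
              rw [hord]
              exact List.mem_filter.mpr ⟨hk, by simp only [decide_eq_true_eq]; omega⟩
            have hc := hcnt l hlo
            rw [hst2 l]
            simp only [hlo, true_and]
            rw [if_pos (by omega)]
            push_cast
            omega
    · refine ⟨k + 1, ?_, ?_⟩
      · simp only [pvLoopA, if_neg hg]
        rw [hacc, pvRep_succ]
        exact (List.prefix_append_right_inj _).mpr
          ((pvPartial_prefix d0 l2a hiM.le).trans (by rw [pvPartial_ge d0 l2a hnd le_rfl]))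
      · simp only [pvLoopA, if_neg hg]
        omega

-- small glue lemmas
theorem pvHead_some (xs : List Int) (h : xs ≠ []) :
    PySem.List.pyGet? xs 0 = some xs.headI := by
  cases xs with
  | nil => simp at h
  | cons a t => simp [PySem.List.pyGet?, PySem.List.pyIdx?]

theorem pvPrefix_headI {xs R : List Int} (h : xs <+: R) (hne : xs ≠ []) :
    xs.headI = R.headI := by
  obtain ⟨t, rfl⟩ := h
  cases xs with
  | nil => simp at hne
  | cons a s => rfl

theorem pvPrefix_take {xs R : List Int} (h : xs <+: R) {n : Nat} (hn : n ≤ xs.length) :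
    xs.take n = R.take n := by
  obtain ⟨t, rfl⟩ := h
  rw [List.take_append_of_le_length hn]

-- B's base list is exactly one epoch
theorem pvAltBase_eq (d0 l2a : PySem.Dict String Int) :
    ((PySem.List.pyRange 0 (PySem.List.maxD d0.values (fun v => v) 0)).flatMap (fun i =>
        (d0.keys.filter (fun l => d0.getD l 0 > i)).map (fun l => (l2a.get? l).getD 0)))
      = pvBase d0 l2a := by
  unfold pvBase pvPartial pvM
  rw [PySem.List.pyRange_one]
  simp only [Int.sub_zero]
  simp only [List.flatMap_map]
  apply List.flatMap_congr
  intro j _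
  simp [pvPass, pvAtom]

-- ===== VERDICT (by name: the statement is the Claim_ definition above) =====
theorem generate_lipid_list_spec : Claim_equal_generate_lipid_list := by
  unfold Claim_equal_generate_lipid_list
  intro lipid_dict length lipid2atom _ hpre
  obtain ⟨h1, hpos, -⟩ := hpre
  show Spec_generate_lipid_list _ _ _ _
  unfold Spec_generate_lipid_list
  simp only [generate_lipid_list, generate_lipid_list_alt]
  have hnd : (PySem.Dict.ofList lipid_dict).keys.Nodup := PySem.Dict.nodup_keys_ofList _
  set d0 := PySem.Dict.ofList lipid_dict with hd0
  set l2a := PySem.Dict.ofList lipid2atom with hl2a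
  rw [pvAltBase_eq d0 l2a]
  set lstA := pvLoopA d0 l2a length (length.toNat + 1) [] d0 d0.keys with hlstA
  set lstB := pvGrowB (pvBase d0 l2a) length (length.toNat + 1) [] with hlstB
  obtain ⟨mA, hprefA, hlenA⟩ := pvLoopA_spec d0 l2a length hnd hpos (length.toNat + 1)
    [] d0 d0.keys 0 0 (pvM_pos d0 hnd hpos) (by simp [pvRep, pvPartial])
    (Or.inl ⟨rfl, rfl, rfl⟩)
    (by simp only [List.length_nil, Nat.cast_zero, zero_add]; push_cast; omega)
  obtain ⟨mB, hBrep, hlenB⟩ := pvGrowB_spec (pvBase d0 l2a) length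
    (pvBase_ne d0 l2a hnd hpos) (length.toNat + 1) [] 0 (by simp [pvRep])
    (by simp only [List.length_nil, Nat.cast_zero, zero_add]; push_cast; omega)
  rw [← hlstA] at hprefA hlenA
  rw [← hlstB] at hBrep hlenB
  have hAne : lstA ≠ [] := by
    intro h; rw [h] at hlenA; simp at hlenA; omega
  have hBne : lstB ≠ [] := by
    intro h; rw [h] at hlenB; simp at hlenB; omega
  have hprefA' : lstA <+: pvRep (pvBase d0 l2a) (max mA mB) :=
    hprefA.trans (pvRep_prefix _ (Nat.le_max_left _ _))
  have hprefB' : lstB <+: pvRep (pvBase d0 l2a) (max mA mB) := by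
    rw [hBrep]; exact pvRep_prefix _ (Nat.le_max_right _ _)
  rw [pvHead_some lstA hAne, pvHead_some lstB hBne]
  simp only []
  rw [PySem.List.slice_to _ (by omega), PySem.List.slice_to _ (by omega)]
  obtain ⟨L1, hL⟩ : ∃ L1, length.toNat = L1 + 1 := ⟨length.toNat - 1, by omega⟩
  rw [hL, List.take_succ_cons, List.take_succ_cons]
  have hA1 : L1 ≤ lstA.length := by omega
  have hB1 : L1 ≤ lstB.length := by omega
  rw [pvPrefix_headI hprefA' hAne, pvPrefix_headI hprefB' hBne,
    pvPrefix_take hprefA' hA1, pvPrefix_take hprefB' hB1]
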